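-- pv_equiv track=rewrite | github.com/daniel-reich/ubiquitous-fiesta | hZ4HzhboCJ5dDiNve_16.py | special_reverse_string
-- ===== SOURCE A (Python) =====
-- def special_reverse_string(txt):
--   upper_position = [c for c, i in enumerate(txt) if str(i).isalpha() and str(i).strip() and i.upper() == i]
--   space_position = [c for c, i in enumerate(txt) if i == " "]
--   txt = list(txt[::-1].lower().replace(" ", ""))
--   for s in space_position:
--       txt.insert(s, " ")
--   for u in upper_position:
--       txt[u] = txt[u].upper()
--   return "".join(txt)
-- ===== SOURCE B (Python) =====
-- def special_reverse_string(txt):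
--     it = iter(txt[::-1].lower().replace(" ", ""))
--     out = []
--     for c in txt:
--         if c == " ":
--             out.append(" ")
--         else:
--             ch = next(it)
--             out.append(ch.upper() if c.isalpha() and c.upper() == c else ch)
--     return "".join(out)
-- ===== Notes on version B (the rewrite author's own statement) =====
-- stated objective: faster
-- what changed: Replaces A's two enumerate-scans for uppercase/space positions plus a list.insert loop and an index-overwrite loop over the rebuilt list by a single pass over the original string that consumes an iterator over the reversed lowercased space-free stream, emitting spaces in place and uppercasing on the fly.
import Mathlib
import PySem

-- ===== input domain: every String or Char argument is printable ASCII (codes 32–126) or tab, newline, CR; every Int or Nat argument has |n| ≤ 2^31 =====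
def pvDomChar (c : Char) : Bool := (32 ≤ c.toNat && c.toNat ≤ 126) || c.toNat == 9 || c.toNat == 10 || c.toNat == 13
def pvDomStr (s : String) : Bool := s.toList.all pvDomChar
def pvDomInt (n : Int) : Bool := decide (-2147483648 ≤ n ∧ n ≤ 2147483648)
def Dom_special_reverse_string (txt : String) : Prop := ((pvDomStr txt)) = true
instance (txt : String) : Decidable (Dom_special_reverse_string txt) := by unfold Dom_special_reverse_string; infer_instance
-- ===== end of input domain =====

-- B replaces A's position-table-then-insert/overwrite reconstruction by one streaming pass over the
-- original string guided by the reversed lowercased space-free character stream (objective: simpler).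

-- ===== PORT A =====
def special_reverse_string (txt : String) : String :=
  let cs := txt.toList
  let upper_position : List Int :=
    ((PySem.List.enumerate cs).filter (fun p =>
        PySem.Chars.strIsalpha [p.2] && !(PySem.Chars.strip [p.2]).isEmpty
          && (PySem.Chars.upper [p.2] == [p.2]))).map (fun p => p.1)
  let space_position : List Int :=
    ((PySem.List.enumerate cs).filter (fun p => p.2 == ' ')).map (fun p => p.1)
  -- txt = list(txt[::-1].lower().replace(" ", ""))  (s[::-1] is List.reverse: PySem.List.slice?_none_none_neg_one)
  let t0 : List Char := PySem.Chars.replace (PySem.Chars.lower cs.reverse) [' '] []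
  let t1 : List Char := space_position.foldl (fun acc s => PySem.List.insert acc s ' ') t0
  -- txt[u] = txt[u].upper(): on the admitted (ASCII) domain u is always in range, so the total
  -- pyGetD/pySetD forms are exact here
  let t2 : List Char := upper_position.foldl (fun acc u =>
      PySem.List.pySetD acc u (PySem.Chars.upperChar (PySem.List.pyGetD acc u ' '))) t1
  String.ofList t2

-- ===== PORT B =====
-- it = iter(txt[::-1].lower().replace(" ", ""))
def srsStream (cs : List Char) : List Char :=
  PySem.Chars.replace (PySem.Chars.lower cs.reverse) [' '] []

-- the single pass: space emits a space, otherwise take next(it) and uppercase it when the original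
-- char is an uppercase letter.  (next(it) never raises on the admitted domain: the stream carries
-- exactly one char per non-space char of txt, so the [] branch is unreachable there.)
def srsGo : List Char → List Char → List Char
  | [], _ => []
  | c :: rest, s =>
    if c == ' ' then ' ' :: srsGo rest s
    else
      match s with
      | [] => []
      | ch :: t =>
        (if PySem.Chars.isalpha c && (PySem.Chars.upperChar c == c)
         then PySem.Chars.upperChar ch else ch) :: srsGo rest t

def special_reverse_string_alt (txt : String) : String :=
  String.ofList (srsGo txt.toList (srsStream txt.toList))

-- ===== PRECONDITION & SPEC =====
def Spec_special_reverse_string (txt : String) (out : String) : Prop := out = special_reverse_string_alt txt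
instance (txt : String) (out : String) : Decidable (Spec_special_reverse_string txt out) := by unfold Spec_special_reverse_string; infer_instance

-- ===== CLAIM (what is proved, stated in full; the proofs are below) =====
def Claim_equal_special_reverse_string : Prop := ∀ (txt : String), Dom_special_reverse_string txt → Spec_special_reverse_string txt (special_reverse_string txt)

-- ===== LEMMAS AND PROOFS =====


lemma srs_upper_bounds (c : Char) (h : PySem.Chars.isupper c = true) :
    65 ≤ c.toNat ∧ c.toNat ≤ 90 := by
  unfold PySem.Chars.isupper at h
  simp only [Bool.and_eq_true, decide_eq_true_eq] at h
  obtain ⟨h1, h2⟩ := h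
  rw [Char.le_def] at h1 h2
  exact ⟨UInt32.le_iff_toNat_le.mp h1, UInt32.le_iff_toNat_le.mp h2⟩

lemma srs_lower_bounds (c : Char) (h : PySem.Chars.islower c = true) :
    97 ≤ c.toNat ∧ c.toNat ≤ 122 := by
  unfold PySem.Chars.islower at h
  simp only [Bool.and_eq_true, decide_eq_true_eq] at h
  obtain ⟨h1, h2⟩ := h
  rw [Char.le_def] at h1 h2
  exact ⟨UInt32.le_iff_toNat_le.mp h1, UInt32.le_iff_toNat_le.mp h2⟩

-- `s.replace(" ", "")` with a one-char pattern and empty replacement is a filter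
lemma srs_go_filter (c0 : Char) :
    ∀ (fuel : Nat) (l acc : List Char), l.length ≤ fuel →
      PySem.Chars.replace.go [c0] [] fuel l acc = acc.reverse ++ l.filter (fun x => !(x == c0)) := by
  intro fuel
  induction fuel with
  | zero =>
    intro l acc h
    have hl : l = [] := List.eq_nil_of_length_eq_zero (Nat.le_zero.mp h)
    subst hl
    simp [PySem.Chars.replace.go]
  | succ f ih =>
    intro l acc h
    cases l with
    | nil => simp [PySem.Chars.replace.go]
    | cons c t =>
      rw [PySem.Chars.replace.go]
      by_cases hc : c = c0
      · subst hc
        have hd : List.drop [c].length (c :: t) = t := by simp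
        simp only [List.isPrefixOf, BEq.rfl, Bool.true_and, if_pos, hd]
        simp only [List.length_cons] at h
        rw [ih _ _ (by omega)]
        simp
      · have hpre : [c0].isPrefixOf (c :: t) = false := by
          simp [List.isPrefixOf]
          exact fun hh => (hc hh.symm).elim
        simp only [hpre, Bool.false_eq_true, if_neg, not_false_iff]
        simp only [List.length_cons] at h
        rw [ih _ _ (by omega)]
        simp [hc]

lemma srs_replace_singleton (s : List Char) (c0 : Char) :
    PySem.Chars.replace s [c0] [] = s.filter (fun x => !(x == c0)) := by
  have : PySem.Chars.replace s [c0] [] = PySem.Chars.replace.go [c0] [] s.length s [] := by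
    simp [PySem.Chars.replace]
  rw [this, srs_go_filter c0 s.length s [] le_rfl]
  simp

-- lowering a char moves it off/onto ' ' never
lemma srs_lowerChar_space_iff (c : Char) : (PySem.Chars.lowerChar c == ' ') = (c == ' ') := by
  unfold PySem.Chars.lowerChar
  by_cases h : PySem.Chars.isupper c = true
  · obtain ⟨hl, hr⟩ := srs_upper_bounds c h
    simp only [h, if_pos]
    have h1 : (Char.ofNat (c.toNat + 32)).toNat = c.toNat + 32 := by
      have hv : Nat.isValidChar (c.toNat + 32) := Or.inl (by omega)
      simp [Char.ofNat, hv]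
    have h2 : (Char.ofNat (c.toNat + 32) == ' ') = false := by
      apply beq_false_of_ne
      intro he
      have h3 := congrArg Char.toNat he
      rw [h1, show (' ' : Char).toNat = 32 from rfl] at h3
      omega
    have h4 : (c == ' ') = false := by
      apply beq_false_of_ne
      intro he
      have h5 := congrArg Char.toNat he
      rw [show (' ' : Char).toNat = 32 from rfl] at h5
      omega
    rw [h2, h4]
  · simp [h]

lemma srs_stream_length (cs : List Char) :
    (srsStream cs).length = (cs.filter (fun x => !(x == ' '))).length := by
  unfold srsStream
  rw [srs_replace_singleton]
  unfold PySem.Chars.lower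
  have hmap : ∀ X : List Char,
      ((X.map PySem.Chars.lowerChar).filter (fun x => !(x == ' '))).length
        = (X.filter (fun x => !(x == ' '))).length := by
    intro X
    induction X with
    | nil => simp
    | cons a r ih =>
      simp only [List.map_cons, List.filter_cons, srs_lowerChar_space_iff]
      by_cases ha : (a == ' ') = true
      · simp [ha, ih]
      · simp only [Bool.not_eq_true] at ha
        simp [ha, ih]
  rw [hmap cs.reverse, List.filter_reverse, List.length_reverse]

-- the single-char test A performs equals B's per-char test
lemma srs_cond_eq (c : Char) :
    (PySem.Chars.strIsalpha [c] && !(PySem.Chars.strip [c]).isEmpty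
      && (PySem.Chars.upper [c] == [c]))
    = (PySem.Chars.isalpha c && (PySem.Chars.upperChar c == c)) := by
  have hsa : PySem.Chars.strIsalpha [c] = PySem.Chars.isalpha c := by
    simp [PySem.Chars.strIsalpha]
  have hup : (PySem.Chars.upper [c] == [c]) = (PySem.Chars.upperChar c == c) := by
    simp [PySem.Chars.upper, BEq.beq, List.beq]
  by_cases ha : PySem.Chars.isalpha c = true
  · have hb : 65 ≤ c.toNat ∧ c.toNat ≤ 90 ∨ 97 ≤ c.toNat ∧ c.toNat ≤ 122 := by
      unfold PySem.Chars.isalpha at ha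
      rw [Bool.or_eq_true] at ha
      rcases ha with h | h
      · exact Or.inl (srs_upper_bounds c h)
      · exact Or.inr (srs_lower_bounds c h)
    have hns : PySem.Chars.isspace c = false := by
      unfold PySem.Chars.isspace
      simp only [Bool.or_eq_false_iff, Bool.and_eq_false_iff, decide_eq_false_iff_not, not_le]
      omega
    have hstrip : PySem.Chars.strip [c] = [c] := by
      simp [PySem.Chars.strip, PySem.Chars.lstrip, PySem.Chars.rstrip, hns]
    rw [hsa, hup, ha, hstrip]
    simp
  · simp only [Bool.not_eq_true] at ha
    rw [hsa, hup, ha]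
    simp

-- enumerate with shifted start
lemma srs_enum_shift {α : Type} (xs : List α) (s : Int) :
    PySem.List.enumerate xs (s + 1) = (PySem.List.enumerate xs s).map (fun p => (p.1 + 1, p.2)) := by
  induction xs generalizing s with
  | nil => simp [PySem.List.enumerate_nil]
  | cons x t ih =>
    rw [PySem.List.enumerate_cons, PySem.List.enumerate_cons, List.map_cons, ih]

-- A's comprehensions `[c for c, i in enumerate(txt) if Q(i)]`, structurally
def srsIdx (Q : Char → Bool) (L : List Char) : List Int :=
  ((PySem.List.enumerate L).filter (fun p => Q p.2)).map (fun p => p.1)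

lemma srs_idx_nil (Q : Char → Bool) : srsIdx Q [] = [] := by
  simp [srsIdx, PySem.List.enumerate_nil]

lemma srs_idx_cons (Q : Char → Bool) (c : Char) (L : List Char) :
    srsIdx Q (c :: L) = (if Q c then [(0 : Int)] else []) ++ (srsIdx Q L).map (· + 1) := by
  unfold srsIdx
  rw [show PySem.List.enumerate (c :: L) = PySem.List.enumerate (c :: L) 0 from rfl,
      PySem.List.enumerate_cons]
  rw [show (0 : Int) + 1 = 0 + 1 from rfl, srs_enum_shift]
  by_cases hq : Q c = true
  · simp only [List.filter_cons, hq, if_pos, List.map_cons, List.cons_append, List.nil_append,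
      List.filter_map, List.map_map]
    rfl
  · simp only [Bool.not_eq_true] at hq
    simp only [List.filter_cons, hq, Bool.false_eq_true, if_neg, not_false_iff, List.nil_append,
      List.filter_map, List.map_map]
    rfl

lemma srs_idx_nonneg (Q : Char → Bool) (L : List Char) : ∀ p ∈ srsIdx Q L, 0 ≤ p := by
  intro p hp
  unfold srsIdx at hp
  simp only [List.mem_map, List.mem_filter] at hp
  obtain ⟨q, ⟨hq, _⟩, rfl⟩ := hp
  rw [PySem.List.mem_enumerate_iff] at hq
  obtain ⟨k, hk, rfl⟩ := hq
  simp

-- shifting one cell past a fixed head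
lemma srs_insert_shift (S : List Char) (x v : Char) (p : Int) (hp : 0 ≤ p) :
    PySem.List.insert (x :: S) (p + 1) v = x :: PySem.List.insert S p v := by
  obtain ⟨n, rfl⟩ : ∃ m : Nat, p = (m : Int) := ⟨p.toNat, (Int.toNat_of_nonneg hp).symm⟩
  unfold PySem.List.insert PySem.List.sliceIndices
  have h1 : ¬ ((1 : Int) < 0) := by omega
  have h2 : ¬ ((n : Int) + 1 < 0) := by omega
  have h3 : ¬ ((n : Int) < 0) := by omega
  simp only [h1, if_neg, h2, h3, List.length_cons, not_false_iff]
  have h4 : min ((n : Int) + 1) ((S.length : Nat) + 1 : Nat) = min (n : Int) (S.length : Int) + 1 := by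
    push_cast
    omega
  rw [h4]
  have h5 : (min (n : Int) (S.length : Int) + 1).toNat = (min (n : Int) (S.length : Int)).toNat + 1 := by
    omega
  rw [h5]
  simp [List.take_succ_cons, List.drop_succ_cons]

lemma srs_set_shift (M : List Char) (x : Char) (p : Int) (hp : 0 ≤ p) :
    PySem.List.pySetD (x :: M) (p + 1) (PySem.Chars.upperChar (PySem.List.pyGetD (x :: M) (p + 1) ' '))
      = x :: PySem.List.pySetD M p (PySem.Chars.upperChar (PySem.List.pyGetD M p ' ')) := by
  obtain ⟨n, rfl⟩ : ∃ m : Nat, p = (m : Int) := ⟨p.toNat, (Int.toNat_of_nonneg hp).symm⟩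
  have hc : (n : Int) + 1 = ((n + 1 : Nat) : Int) := by push_cast; ring
  rw [hc]
  simp only [PySem.List.pyGetD_natCast, PySem.List.pySetD_natCast, List.getD_cons_succ,
    List.set_cons_succ]

lemma srs_foldl_insert_shift (ps : List Int) (hps : ∀ p ∈ ps, 0 ≤ p) (S : List Char) (x : Char) :
    (ps.map (· + 1)).foldl (fun acc s => PySem.List.insert acc s ' ') (x :: S)
      = x :: ps.foldl (fun acc s => PySem.List.insert acc s ' ') S := by
  induction ps generalizing S with
  | nil => simp
  | cons p t ih =>
    simp only [List.map_cons, List.foldl_cons]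
    rw [srs_insert_shift S x ' ' p (hps p (by simp))]
    exact ih (fun q hq => hps q (by simp [hq])) _

lemma srs_foldl_set_shift (ps : List Int) (hps : ∀ p ∈ ps, 0 ≤ p) (M : List Char) (x : Char) :
    (ps.map (· + 1)).foldl (fun acc u =>
        PySem.List.pySetD acc u (PySem.Chars.upperChar (PySem.List.pyGetD acc u ' '))) (x :: M)
      = x :: ps.foldl (fun acc u =>
        PySem.List.pySetD acc u (PySem.Chars.upperChar (PySem.List.pyGetD acc u ' '))) M := by
  induction ps generalizing M with
  | nil => simp
  | cons p t ih =>
    simp only [List.map_cons, List.foldl_cons]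
    rw [srs_set_shift M x p (hps p (by simp))]
    exact ih (fun q hq => hps q (by simp [hq])) _

-- proof-side description of what the space-insert loop builds
def srsWeave : List Char → List Char → List Char
  | [], s => s
  | c :: r, s =>
    if c == ' ' then ' ' :: srsWeave r s
    else
      match s with
      | [] => []
      | h :: t => h :: srsWeave r t

lemma srs_insert_loop (L : List Char) :
    ∀ S : List Char, S.length = (L.filter (fun x => !(x == ' '))).length →
      (srsIdx (fun c => c == ' ') L).foldl (fun acc s => PySem.List.insert acc s ' ') S
        = srsWeave L S := by
  induction L with
  | nil =>
    intro S _
    simp [srs_idx_nil, srsWeave]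
  | cons c r ih =>
    intro S hS
    rw [srs_idx_cons]
    by_cases hc : c = ' '
    · subst hc
      simp only [BEq.rfl, if_pos, List.cons_append, List.nil_append, List.foldl_cons]
      rw [PySem.List.insert_zero]
      rw [srs_foldl_insert_shift _ (srs_idx_nonneg _ r) _ _]
      rw [ih S (by simpa using hS)]
      simp [srsWeave]
    · have hb : (c == ' ') = false := beq_false_of_ne hc
      simp only [hb, Bool.false_eq_true, if_neg, not_false_iff, List.nil_append]
      cases S with
      | nil =>
        exfalso
        simp [hb] at hS
      | cons h t =>
        rw [srs_foldl_insert_shift _ (srs_idx_nonneg _ r) _ _]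
        have ht : t.length = (r.filter (fun x => !(x == ' '))).length := by
          simp [hb] at hS
          omega
        rw [ih t ht]
        simp [srsWeave, hb]

lemma srs_upper_loop (L : List Char) :
    ∀ S : List Char, S.length = (L.filter (fun x => !(x == ' '))).length →
      (srsIdx (fun c => PySem.Chars.strIsalpha [c] && !(PySem.Chars.strip [c]).isEmpty
          && (PySem.Chars.upper [c] == [c])) L).foldl
        (fun acc u => PySem.List.pySetD acc u (PySem.Chars.upperChar (PySem.List.pyGetD acc u ' ')))
        (srsWeave L S)
        = srsGo L S := by
  induction L with
  | nil =>
    intro S hS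
    have : S = [] := List.eq_nil_of_length_eq_zero (by simpa using hS)
    subst this
    simp [srs_idx_nil, srsWeave, srsGo]
  | cons c r ih =>
    intro S hS
    simp only [srs_cond_eq] at ih
    rw [srs_idx_cons]
    simp only [srs_cond_eq]
    by_cases hc : c = ' '
    · subst hc
      have hA : (PySem.Chars.isalpha ' ' && (PySem.Chars.upperChar ' ' == ' ')) = false := by decide
      simp only [hA, Bool.false_eq_true, if_neg, not_false_iff, List.nil_append]
      have hw : srsWeave (' ' :: r) S = ' ' :: srsWeave r S := by simp [srsWeave]
      rw [hw]
      rw [srs_foldl_set_shift _ (srs_idx_nonneg _ r) _ _]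
      rw [ih S (by simpa using hS)]
      simp [srsGo]
    · have hb : (c == ' ') = false := beq_false_of_ne hc
      cases S with
      | nil =>
        exfalso
        simp [hb] at hS
      | cons h t =>
        have hw : srsWeave (c :: r) (h :: t) = h :: srsWeave r t := by simp [srsWeave, hb]
        rw [hw]
        have ht : t.length = (r.filter (fun x => !(x == ' '))).length := by
          simp [hb] at hS
          omega
        by_cases hA : (PySem.Chars.isalpha c && (PySem.Chars.upperChar c == c)) = true
        · simp only [hA, if_pos, List.cons_append, List.nil_append, List.foldl_cons]
          have hstep :
              PySem.List.pySetD (h :: srsWeave r t) 0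
                (PySem.Chars.upperChar (PySem.List.pyGetD (h :: srsWeave r t) 0 ' '))
              = PySem.Chars.upperChar h :: srsWeave r t := by
            rw [show (0 : Int) = ((0 : Nat) : Int) from rfl]
            simp only [PySem.List.pyGetD_natCast, PySem.List.pySetD_natCast]
            simp
          rw [hstep]
          rw [srs_foldl_set_shift _ (srs_idx_nonneg _ r) _ _]
          rw [ih t ht]
          simp [srsGo, hb, hA]
        · simp only [Bool.not_eq_true] at hA
          simp only [hA, Bool.false_eq_true, if_neg, not_false_iff, List.nil_append]
          rw [srs_foldl_set_shift _ (srs_idx_nonneg _ r) _ _]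
          rw [ih t ht]
          simp [srsGo, hb, hA]

-- ===== VERDICT (by name: the statement is the Claim_ definition above) =====
theorem special_reverse_string_spec : Claim_equal_special_reverse_string := by
  intro txt _hdom
  unfold Spec_special_reverse_string special_reverse_string special_reverse_string_alt
  have h1 := srs_insert_loop txt.toList (srsStream txt.toList) (srs_stream_length txt.toList)
  have h2 := srs_upper_loop txt.toList (srsStream txt.toList) (srs_stream_length txt.toList)
  simp only [srsIdx, srsStream] at h1 h2
  simp only [h1, h2]
  rfl
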